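-- pv_equiv track=rewrite | github.com/recscse/tradingbot | services/fno_stock_service.py | _get_quality_recommendations
-- ===== SOURCE A (Python) =====
-- from typing import List, Dict, Optional, Any
--
-- def _get_quality_recommendations(issues: List[str]) -> List[str]:
--     """Get recommendations based on data quality issues"""
--     recommendations = []
--
--     if any("missing symbols" in issue for issue in issues):
--         recommendations.append("Run symbol mapping fix to resolve missing symbols")
--
--     if any("invalid symbol" in issue for issue in issues):
--         recommendations.append("Review and correct symbol formats")
--
--     if any("name format" in issue for issue in issues):
--         recommendations.append("Clean and standardize company names")
--
--     if any("Count too" in issue for issue in issues):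
--         recommendations.append("Review data sources and filtering logic")
--
--     if not recommendations:
--         recommendations.append("Data quality is good")
--
--     return recommendations
-- ===== SOURCE B (Python) =====
-- _KEYS = ("missing symbols", "invalid symbol", "name format", "Count too")
-- _RECS = ("Run symbol mapping fix to resolve missing symbols",
--          "Review and correct symbol formats",
--          "Clean and standardize company names",
--          "Review data sources and filtering logic")
--
-- # All 16 possible answers, precomputed once: _OUT[m] is the output for match-bitmask m.
-- _OUT = [
--     [r for b, r in zip((1, 2, 4, 8), _RECS) if m & b] or ["Data quality is good"]
--     for m in range(16)
-- ]
--
-- def _get_quality_recommendations(issues):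
--     """OR together a per-issue bitmask of matched patterns, then look the answer up."""
--     mask = 0
--     for issue in issues:
--         for b, key in zip((1, 2, 4, 8), _KEYS):
--             if key in issue:
--                 mask |= b
--     return list(_OUT[mask])
-- ===== Notes on version B (the rewrite author's own statement) =====
-- stated objective: alternative
-- what changed: B ORs per-issue bitmasks of matched patterns in one fold and returns the answer by indexing a precomputed 16-entry table of all possible outputs, replacing A's four any-scans and conditional-append branch chain.
import Mathlib
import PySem

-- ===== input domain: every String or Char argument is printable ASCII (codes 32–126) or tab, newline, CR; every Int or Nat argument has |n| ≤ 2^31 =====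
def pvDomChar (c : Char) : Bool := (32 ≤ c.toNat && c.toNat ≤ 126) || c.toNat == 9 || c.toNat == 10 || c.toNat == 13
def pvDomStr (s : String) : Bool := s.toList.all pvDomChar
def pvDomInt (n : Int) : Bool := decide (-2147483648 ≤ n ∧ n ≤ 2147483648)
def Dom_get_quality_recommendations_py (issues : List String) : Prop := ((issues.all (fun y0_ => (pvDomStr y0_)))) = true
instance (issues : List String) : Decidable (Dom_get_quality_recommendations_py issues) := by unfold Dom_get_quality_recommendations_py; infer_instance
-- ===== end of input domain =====

-- B replaces A's four any-scans and branch chain by one fold ORing per-issue bitmasks of matched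
-- patterns, and returns a precomputed 16-entry table's row for that mask (no per-call emission logic).

-- ===== PORT A =====
def get_quality_recommendations_py (issues : List String) : List String :=
  let recommendations : List String := []
  let recommendations :=
    if issues.any (fun issue => PySem.Str.isIn "missing symbols" issue) then
      recommendations ++ ["Run symbol mapping fix to resolve missing symbols"] else recommendations
  let recommendations :=
    if issues.any (fun issue => PySem.Str.isIn "invalid symbol" issue) then
      recommendations ++ ["Review and correct symbol formats"] else recommendations
  let recommendations :=
    if issues.any (fun issue => PySem.Str.isIn "name format" issue) then
      recommendations ++ ["Clean and standardize company names"] else recommendations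
  let recommendations :=
    if issues.any (fun issue => PySem.Str.isIn "Count too" issue) then
      recommendations ++ ["Review data sources and filtering logic"] else recommendations
  if recommendations = [] then recommendations ++ ["Data quality is good"] else recommendations

-- ===== PORT B =====
-- zip((1,2,4,8), _KEYS) / zip((1,2,4,8), _RECS); the Python masks are nonnegative < 16, ported as Nat
def qKeyBits : List (Nat × String) :=
  [(1, "missing symbols"), (2, "invalid symbol"), (4, "name format"), (8, "Count too")]
def qRecBits : List (Nat × String) :=
  [(1, "Run symbol mapping fix to resolve missing symbols"),
   (2, "Review and correct symbol formats"),
   (4, "Clean and standardize company names"),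
   (8, "Review data sources and filtering logic")]

-- the module-level comprehension building _OUT (all 16 answers)
def qOut : List (List String) :=
  (List.range 16).map (fun m =>
    let recs := qRecBits.filterMap (fun br => if m &&& br.1 ≠ 0 then some br.2 else none)
    if recs = [] then ["Data quality is good"] else recs)

def get_quality_recommendations_py_alt (issues : List String) : List String :=
  let mask : Nat := issues.foldl (fun mask issue =>
    qKeyBits.foldl (fun mask bk =>
      if PySem.Str.isIn bk.2 issue then mask ||| bk.1 else mask) mask) 0
  qOut.getD mask []   -- _OUT[mask]; mask < 16 always, so the plain index is exact

-- ===== PRECONDITION & SPEC =====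
def Spec_get_quality_recommendations_py (issues : List String) (out : List String) : Prop := out = get_quality_recommendations_py_alt issues
instance (issues : List String) (out : List String) : Decidable (Spec_get_quality_recommendations_py issues out) := by unfold Spec_get_quality_recommendations_py; infer_instance

-- ===== CLAIM (what is proved, stated in full; the proofs are below) =====
def Claim_equal_get_quality_recommendations_py : Prop := ∀ (issues : List String), Dom_get_quality_recommendations_py issues → Spec_get_quality_recommendations_py issues (get_quality_recommendations_py issues)

-- ===== LEMMAS AND PROOFS =====

-- the bitmask built from four match flags
def qMix (a b c d : Bool) : Nat := (cond a 1 0) ||| (cond b 2 0) ||| (cond c 4 0) ||| (cond d 8 0)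

-- one issue's inner fold ORs that issue's match bitmask into the accumulator
theorem qInner_step (m : Nat) (issue : String) :
    qKeyBits.foldl (fun mask bk =>
      if PySem.Str.isIn bk.2 issue then mask ||| bk.1 else mask) m
    = m ||| qMix (PySem.Str.isIn "missing symbols" issue) (PySem.Str.isIn "invalid symbol" issue)
              (PySem.Str.isIn "name format" issue) (PySem.Str.isIn "Count too" issue) := by
  simp only [qKeyBits, List.foldl, qMix]
  split_ifs <;> simp_all [Nat.or_assoc]

-- ORing two flag bitmasks is the bitmask of the ORed flags
theorem qMix_or (a b c d a' b' c' d' : Bool) :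
    qMix a b c d ||| qMix a' b' c' d' = qMix (a || a') (b || b') (c || c') (d || d') := by
  cases a <;> cases b <;> cases c <;> cases d <;>
    cases a' <;> cases b' <;> cases c' <;> cases d' <;> decide

-- B's fold computes the bitmask of A's four any-scans
theorem qMask_eq (issues : List String) (m : Nat) :
    issues.foldl (fun mask issue =>
      qKeyBits.foldl (fun mask bk =>
        if PySem.Str.isIn bk.2 issue then mask ||| bk.1 else mask) mask) m
    = m ||| qMix (issues.any (fun i => PySem.Str.isIn "missing symbols" i))
              (issues.any (fun i => PySem.Str.isIn "invalid symbol" i))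
              (issues.any (fun i => PySem.Str.isIn "name format" i))
              (issues.any (fun i => PySem.Str.isIn "Count too" i)) := by
  induction issues generalizing m with
  | nil => simp [qMix]
  | cons i rest ih =>
      simp only [List.foldl_cons, List.any_cons]
      rw [qInner_step, ih, Nat.or_assoc, qMix_or]

-- table lookup at a mix-mask equals A's branch chain on the same flags
theorem qOut_mix (a b c d : Bool) :
    qOut.getD (qMix a b c d) [] =
      (let r : List String := []
       let r := if a then r ++ ["Run symbol mapping fix to resolve missing symbols"] else r
       let r := if b then r ++ ["Review and correct symbol formats"] else r
       let r := if c then r ++ ["Clean and standardize company names"] else r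
       let r := if d then r ++ ["Review data sources and filtering logic"] else r
       if r = [] then r ++ ["Data quality is good"] else r) := by
  cases a <;> cases b <;> cases c <;> cases d <;> decide

-- ===== VERDICT (by name: the statement is the Claim_ definition above) =====
theorem get_quality_recommendations_py_spec : Claim_equal_get_quality_recommendations_py := by
  intro issues _
  unfold Spec_get_quality_recommendations_py get_quality_recommendations_py get_quality_recommendations_py_alt
  rw [qMask_eq issues 0, Nat.zero_or, qOut_mix]
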